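-- pv_equiv track=rewrite | github.com/W-Thurston/Advent-of-Code-Lets-Learn | src/aoc2025/solutions/day08/optimized.py | part1
-- ===== SOURCE A (Python) =====
-- def parse_points(data: list[str]) -> list[tuple[int]]:
--     pts: list[tuple[int]] = []
--     for line in data:
--         line: str = line.strip()  # noqa: PLW2901
--         if not line:
--             continue
--         x, y, z = line.split(",")
--         pts.append((int(x), int(y), int(z)))
--     return pts
--
-- def dsu_find(parent: list[int], x: int) -> int:
--     while parent[x] != x:
--         parent[x] = parent[parent[x]]  # path compression
--         x = parent[x]
--     return x
--
-- def dsu_union(parent: list[int], size: list[int], a: int, b: int) -> bool: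
--     ra: int = dsu_find(parent, a)
--     rb: int = dsu_find(parent, b)
--     if ra == rb:
--         return False
--     if size[ra] < size[rb]:
--         ra, rb = rb, ra
--     parent[rb] = ra
--     size[ra] += size[rb]
--     return True
--
-- def compute_edges(points: list[tuple[int]]) -> list[tuple[int]]:
--     """Squared distances; returns sorted list of (dist_sq, i, j)."""
--     edges: list[tuple[int]] = []
--     n: int = len(points)
--     for i in range(n):
--         x1, y1, z1 = points[i]
--         for j in range(i + 1, n):
--             x2, y2, z2 = points[j]
--             dx: int = x1 - x2
--             dy: int = y1 - y2
--             dz: int = z1 - z2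
--             edges.append((dx * dx + dy * dy + dz * dz, i, j))
--     edges.sort(key=lambda e: e[0])
--     return edges
--
-- def part1(data: list[str], n_closest_edges: int = 1000) -> int:
--     points: list[tuple[int]] = parse_points(data)
--     n: int = len(points)
--     if n == 0:
--         return 0
--
--     edges: list[tuple[int]] = compute_edges(points)
--     parent: list[int] = list(range(n))
--     size: list[int] = [1] * n
--
--     # Apply first 1000 edges
--     limit: int = min(n_closest_edges, len(edges))
--     for k in range(limit):
--         _, a, b = edges[k]
--         dsu_union(parent, size, a, b)
--
--     # Compute final component sizes
--     comp_count: dict = {}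
--     for i in range(n):
--         r: int = dsu_find(parent, i)
--         comp_count[r] = comp_count.get(r, 0) + 1
--
--     sizes: list = sorted(comp_count.values(), reverse=True)
--     if not sizes:
--         return 0
--
--     prod = 1
--     for s in sizes[:3]:
--         prod *= s
--     return prod
-- ===== SOURCE B (Python) =====
-- def part1(data, n_closest_edges=1000):
--     # Parse: same point list as the original (blank lines skipped).
--     rows = (ln.strip() for ln in data)
--     points = [(int(x), int(y), int(z))
--               for x, y, z in (ln.split(",") for ln in rows if ln)]
--     n = len(points)
--     if n == 0:
--         return 0
--
--     # Same edge ordering: stable sort by squared distance of the (i, j) pairs.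
--     edges = sorted(
--         (((p[0] - q[0]) ** 2 + (p[1] - q[1]) ** 2 + (p[2] - q[2]) ** 2, i, j)
--          for i, p in enumerate(points)
--          for j, q in enumerate(points[i + 1:], i + 1)),
--         key=lambda e: e[0])
--
--     # Cluster by merging explicit component lists instead of a union-find forest.
--     comps = [[i] for i in range(n)]
--     for _, a, b in edges[:max(0, n_closest_edges)]:
--         ca = next(c for c in comps if a in c)
--         cb = next(c for c in comps if b in c)
--         if ca != cb:
--             comps = [ca + cb] + [c for c in comps if c != ca and c != cb]
--
--     sizes = sorted((len(c) for c in comps), reverse=True)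
--     prod = 1
--     for s in sizes[:3]:
--         prod *= s
--     return prod
-- ===== Notes on version B (the rewrite author's own statement) =====
-- stated objective: alternative
-- what changed: The union-find forest (path compression + union by size) is replaced by explicit component lists: each selected edge merges the two lists containing its endpoints, and the answer is read off the list lengths; parsing and edge generation become comprehensions fed to sorted().
import Mathlib
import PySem

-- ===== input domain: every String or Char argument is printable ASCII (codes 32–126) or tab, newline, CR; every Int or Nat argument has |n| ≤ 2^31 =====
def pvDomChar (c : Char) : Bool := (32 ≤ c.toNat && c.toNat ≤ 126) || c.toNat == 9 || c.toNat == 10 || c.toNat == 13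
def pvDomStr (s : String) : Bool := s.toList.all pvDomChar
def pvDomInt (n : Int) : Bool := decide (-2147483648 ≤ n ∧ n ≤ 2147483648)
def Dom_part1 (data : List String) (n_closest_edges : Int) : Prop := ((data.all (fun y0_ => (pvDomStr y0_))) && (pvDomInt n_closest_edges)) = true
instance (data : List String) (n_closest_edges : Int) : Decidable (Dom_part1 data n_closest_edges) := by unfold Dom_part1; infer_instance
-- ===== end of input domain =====

-- B replaces the union-find forest (path compression + union by size) with explicit
-- component lists merged per selected edge: a different clustering data structure of
-- similar overall cost (the O(n^2 log n) edge sort dominates both).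


-- ===== PORT A =====
-- parse_points (A): explicit loop, skip blank lines, split on "," into exactly x,y,z
def parsePointsA : List String → Option (List (Int × Int × Int))
  | [] => some []
  | l :: ls =>
    let s := PySem.Str.strip l
    if s = "" then parsePointsA ls
    else
      match PySem.Str.split? s "," with
      | some [x, y, z] =>
        match PySem.Int.ofStr? x, PySem.Int.ofStr? y, PySem.Int.ofStr? z with
        | some a, some b, some c => (parsePointsA ls).map (fun r => (a, b, c) :: r)
        | _, _, _ => none
      | _ => none

-- dsu_find with path compression; the while loop gets fuel (= list length at the call
-- sites), which is enough on every state part1 builds (proved via the depth measure d)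
def dsuFindA : Nat → List Int → Int → List Int × Int
  | 0, parent, x => (parent, x)
  | fuel + 1, parent, x =>
    let px := PySem.List.pyGetD parent x 0
    if px = x then (parent, x)
    else
      let pp := PySem.List.pyGetD parent px 0
      dsuFindA fuel (PySem.List.pySetD parent x pp) pp

def dsuUnionA (parent size : List Int) (a b : Int) : List Int × List Int × Bool :=
  let r1 := dsuFindA parent.length parent a
  let r2 := dsuFindA r1.1.length r1.1 b
  let ra := r1.2
  let rb := r2.2
  if ra = rb then (r2.1, size, false)
  else
    let pr := if PySem.List.pyGetD size ra 0 < PySem.List.pyGetD size rb 0 then (rb, ra) else (ra, rb)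
    (PySem.List.pySetD r2.1 pr.2 pr.1,
     PySem.List.pySetD size pr.1 (PySem.List.pyGetD size pr.1 0 + PySem.List.pyGetD size pr.2 0),
     true)

-- compute_edges (A): nested index loops appending, then stable sort by distance
def computeEdgesA (points : List (Int × Int × Int)) : List (Int × Int × Int) :=
  let n : Int := PySem.List.len points
  let edges := (PySem.List.pyRange 0 n).foldl (fun acc i =>
    let p := PySem.List.pyGetD points i (0, 0, 0)
    (PySem.List.pyRange (i + 1) n).foldl (fun acc2 j =>
      let q := PySem.List.pyGetD points j (0, 0, 0)
      let dx := p.1 - q.1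
      let dy := p.2.1 - q.2.1
      let dz := p.2.2 - q.2.2
      acc2 ++ [(dx * dx + dy * dy + dz * dz, i, j)]) acc) []
  PySem.List.sorted edges (fun e => e.1) false

-- the body of A's union loop over the first `limit` edges
def stepA (st : List Int × List Int) (e : Int × Int × Int) : List Int × List Int :=
  let r := dsuUnionA st.1 st.2 e.2.1 e.2.2
  (r.1, r.2.1)

def part1 (data : List String) (n_closest_edges : Int) : Int :=
  match parsePointsA data with
  | none => 0
  | some points =>
    let n := points.length
    if n = 0 then 0
    else
      let edges := computeEdgesA points
      let parent0 : List Int := PySem.List.pyRange 0 (n : Int)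
      let size0 : List Int := List.replicate n 1
      let limit : Int := min n_closest_edges (PySem.List.len edges)
      let st := (PySem.List.pyRange 0 limit).foldl
        (fun st k => stepA st (PySem.List.pyGetD edges k (0, 0, 0))) (parent0, size0)
      let st2 := (PySem.List.pyRange 0 (n : Int)).foldl (fun st2 i =>
        let r := dsuFindA st2.1.length st2.1 i
        (r.1, st2.2.insert r.2 (st2.2.getD r.2 0 + 1)))
        (st.1, (PySem.Dict.empty : PySem.Dict Int Int))
      let sizes := PySem.List.sorted (PySem.Dict.values st2.2) (fun v => v) true
      if sizes = [] then 0
      else (PySem.List.slice sizes none (some 3)).foldl (fun prod s => prod * s) 1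

-- ===== PORT B =====
-- one row of B's parsing comprehension
def parseRowB (s : String) : Option (Int × Int × Int) :=
  match PySem.Str.split? s "," with
  | some [x, y, z] =>
    match PySem.Int.ofStr? x, PySem.Int.ofStr? y, PySem.Int.ofStr? z with
    | some a, some b, some c => some (a, b, c)
    | _, _, _ => none
  | _ => none

def parsePointsB (data : List String) : Option (List (Int × Int × Int)) :=
  ((data.map PySem.Str.strip).filter (fun s => s != "")).mapM parseRowB

-- compute edges (B): enumerate-based comprehension fed to sorted(key=first)
def computeEdgesB (points : List (Int × Int × Int)) : List (Int × Int × Int) :=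
  let gen := (PySem.List.enumerate points).flatMap (fun ip =>
    (PySem.List.enumerate (PySem.List.slice points (some (ip.1 + 1)) none) (ip.1 + 1)).map
      (fun jq =>
        ((ip.2.1 - jq.2.1) ^ 2 + (ip.2.2.1 - jq.2.2.1) ^ 2 + (ip.2.2.2 - jq.2.2.2) ^ 2,
         ip.1, jq.1)))
  PySem.List.sorted gen (fun e => e.1) false

-- the body of B's merge loop: find the two component lists, merge them if distinct
def stepB (comps : List (List Int)) (e : Int × Int × Int) : List (List Int) :=
  let ca := (comps.find? (fun c => c.contains e.2.1)).getD []
  let cb := (comps.find? (fun c => c.contains e.2.2)).getD []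
  if ca = cb then comps
  else (ca ++ cb) :: comps.filter (fun c => c != ca && c != cb)

def part1_alt (data : List String) (n_closest_edges : Int) : Int :=
  match parsePointsB data with
  | none => 0
  | some points =>
    let n := points.length
    if n = 0 then 0
    else
      let edges := computeEdgesB points
      let comps0 := (PySem.List.pyRange 0 (n : Int)).map (fun i => [i])
      let comps := (PySem.List.slice edges none (some (max 0 n_closest_edges))).foldl stepB comps0
      let sizes := PySem.List.sorted (comps.map (fun c => PySem.List.len c)) (fun v => v) true
      (PySem.List.slice sizes none (some 3)).foldl (fun prod s => prod * s) 1

-- ===== PRECONDITION & SPEC =====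
-- Pre_ excludes exactly the inputs where A raises: a nonempty stripped line that does
-- not split on "," into exactly three int()-parseable fields (ValueError in Python A).
def Pre_part1 (data : List String) (n_closest_edges : Int) : Prop :=
  ∀ l ∈ data,
    PySem.Str.strip l = "" ∨
    ((PySem.Str.split? (PySem.Str.strip l) ",").getD []).length = 3 ∧
      ∀ p ∈ (PySem.Str.split? (PySem.Str.strip l) ",").getD [], (PySem.Int.ofStr? p).isSome

instance (data : List String) (n_closest_edges : Int) : Decidable (Pre_part1 data n_closest_edges) := by
  unfold Pre_part1; infer_instance

def pvWitness_part1 : List String × Int := (["1,2,3", " 4 , 5, 6", "", "1,1,1"], 2)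

def Spec_part1 (data : List String) (n_closest_edges : Int) (out : Int) : Prop := out = part1_alt data n_closest_edges
instance (data : List String) (n_closest_edges : Int) (out : Int) : Decidable (Spec_part1 data n_closest_edges out) := by unfold Spec_part1; infer_instance

-- ===== CLAIM (what is proved, stated in full; the proofs are below) =====
def Claim_equal_part1 : Prop := ∀ (data : List String) (n_closest_edges : Int), Dom_part1 data n_closest_edges → Pre_part1 data n_closest_edges → Spec_part1 data n_closest_edges (part1 data n_closest_edges)

-- ===== LEMMAS AND PROOFS =====

/-- index in range as an Int for an n-element structure -/
def pvInR (n : Nat) (x : Int) : Prop := 0 ≤ x ∧ x < (n : Int)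

/-- invariant carried by A's union-find parent array: ρ assigns every vertex its root,
d is a strictly decreasing depth measure along parent links, C a lower bound via d + C ≤ n -/
structure DSUInv (n : Nat) (p : List Int) (ρ : Int → Int) (d : Int → Nat) (C : Nat) : Prop where
  len : p.length = n
  root_inR : ∀ x, pvInR n x → pvInR n (ρ x)
  root_idem : ∀ x, pvInR n x → ρ (ρ x) = ρ x
  d_root : ∀ x, pvInR n x → d (ρ x) = 0
  parent_inR : ∀ x, pvInR n x → pvInR n (PySem.List.pyGetD p x 0)
  parent_root : ∀ x, pvInR n x → ρ (PySem.List.pyGetD p x 0) = ρ x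
  parent_dec : ∀ x, pvInR n x → x ≠ ρ x → d (PySem.List.pyGetD p x 0) < d x
  root_fix : ∀ x, pvInR n x → x = ρ x → PySem.List.pyGetD p x 0 = x
  d_bound : ∀ x, pvInR n x → d x + C ≤ n

/-- invariant of B's component lists: nonempty blocks over [0,n) covering each vertex exactly once -/
structure CInv (n : Nat) (comps : List (List Int)) : Prop where
  ne : ∀ c ∈ comps, c ≠ []
  inR : ∀ c ∈ comps, ∀ v ∈ c, pvInR n v
  once : ∀ x, pvInR n x → comps.flatten.count x = 1

/-- x and y lie in a common block -/
def SameBlock (comps : List (List Int)) (x y : Int) : Prop := ∃ c, c ∈ comps ∧ x ∈ c ∧ y ∈ c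

/-- joint invariant of the two clustering loops: the union-find partition is the block partition -/
def JInv (n : Nat) (p : List Int) (comps : List (List Int)) : Prop :=
  ∃ ρ d, DSUInv n p ρ d comps.length ∧ CInv n comps ∧
    ∀ x y, pvInR n x → pvInR n y → (ρ x = ρ y ↔ SameBlock comps x y)

-- small generic list facts
lemma pv_count_mul_le_sum (l : List (List Int)) (f : List Int → Nat) (v : List Int) :
    l.count v * f v ≤ (l.map f).sum := by
  induction l with
  | nil => simp
  | cons a l ih =>
    by_cases h : a = v
    · subst h; simp only [List.count_cons_self, List.map_cons, List.sum_cons]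
      have : (l.count a + 1) * f a = l.count a * f a + f a := by ring
      omega
    · rw [List.count_cons_of_ne (by exact fun hv => h hv)]
      simp only [List.map_cons, List.sum_cons]; omega

lemma pv_two_mem_le_sum (l : List (List Int)) (f : List Int → Nat) {c1 c2 : List Int}
    (h1 : c1 ∈ l) (h2 : c2 ∈ l) (hne : c1 ≠ c2) : f c1 + f c2 ≤ (l.map f).sum := by
  induction l with
  | nil => simp at h1
  | cons a l ih =>
    rcases List.mem_cons.mp h1 with h1a | h1l
    · subst h1a
      have h2l : c2 ∈ l := by
        rcases List.mem_cons.mp h2 with h | h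
        · exact absurd h.symm hne
        · exact h
      have : f c2 ≤ (l.map f).sum :=
        List.single_le_sum (by intro x hx; exact Nat.zero_le x) _ (List.mem_map_of_mem h2l)
      simp only [List.map_cons, List.sum_cons]; omega
    · rcases List.mem_cons.mp h2 with h2a | h2l
      · subst h2a
        have : f c1 ≤ (l.map f).sum :=
          List.single_le_sum (by intro x hx; exact Nat.zero_le x) _ (List.mem_map_of_mem h1l)
        simp only [List.map_cons, List.sum_cons]; omega
      · have := ih h1l h2l
        simp only [List.map_cons, List.sum_cons]; omega

lemma pv_get_set (p : List Int) (n : Nat) (hl : p.length = n) {x y : Int} (hx : pvInR n x)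
    (hy : pvInR n y) (v : Int) :
    PySem.List.pyGetD (PySem.List.pySetD p x v) y 0 = if y = x then v else PySem.List.pyGetD p y 0 := by
  obtain ⟨hx0, hxn⟩ := hx
  obtain ⟨hy0, hyn⟩ := hy
  have hxe : x = ((x.toNat : Nat) : Int) := by omega
  have hye : y = ((y.toNat : Nat) : Int) := by omega
  by_cases h : y = x
  · rw [if_pos h, h, hxe, PySem.List.pyGetD_pySetD_natCast p x.toNat x.toNat v 0 (by omega)]
    simp
  · rw [if_neg h, hxe, hye, PySem.List.pyGetD_pySetD_natCast p x.toNat y.toNat v 0 (by omega),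
      if_neg (by omega), ← hye]

-- facts from CInv
lemma CInv.block_exists {n comps} (h : CInv n comps) {x : Int} (hx : pvInR n x) :
    ∃ c, c ∈ comps ∧ x ∈ c := by
  have h1 := h.once x hx
  have : x ∈ comps.flatten := by
    rw [← List.count_pos_iff]; omega
  rcases List.mem_flatten.mp this with ⟨c, hc, hxc⟩
  exact ⟨c, hc, hxc⟩

lemma CInv.block_unique {n comps} (h : CInv n comps) {x : Int} (hx : pvInR n x)
    {c1 c2 : List Int} (h1 : c1 ∈ comps) (h2 : c2 ∈ comps) (hx1 : x ∈ c1) (hx2 : x ∈ c2) :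
    c1 = c2 := by
  by_contra hne
  have hsum := pv_two_mem_le_sum comps (fun c => c.count x) h1 h2 hne
  have e1 : 1 ≤ c1.count x := List.count_pos_iff.mpr hx1
  have e2 : 1 ≤ c2.count x := List.count_pos_iff.mpr hx2
  have hflat := h.once x hx
  rw [List.count_flatten] at hflat
  have hS : (comps.map (fun c => c.count x)).sum = 1 := hflat
  simp only at hsum
  omega

lemma CInv.count_one {n comps} (h : CInv n comps) {c : List Int} (hc : c ∈ comps) :
    comps.count c = 1 := by
  rcases List.exists_mem_of_ne_nil c (h.ne c hc) with ⟨v, hv⟩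
  have hvR := h.inR c hc v hv
  have hmul := pv_count_mul_le_sum comps (fun c => c.count v) c
  have e1 : 1 ≤ c.count v := List.count_pos_iff.mpr hv
  have hflat := h.once v hvR
  rw [List.count_flatten] at hflat
  have hS : (comps.map (fun c => c.count v)).sum = 1 := hflat
  have hcc : 1 ≤ comps.count c := List.count_pos_iff.mpr hc
  simp only at hmul
  nlinarith

lemma CInv.nodup {n comps} (h : CInv n comps) : comps.Nodup := by
  rw [List.nodup_iff_count_le_one]
  intro c
  by_cases hc : c ∈ comps
  · rw [h.count_one hc]
  · rw [List.count_eq_zero_of_not_mem hc]; omega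

lemma CInv.block_nodup {n comps} (h : CInv n comps) {c : List Int} (hc : c ∈ comps) :
    c.Nodup := by
  rw [List.nodup_iff_count_le_one]
  intro v
  by_cases hv : v ∈ c
  · have hvR := h.inR c hc v hv
    have hmul := pv_count_mul_le_sum comps (fun c => c.count v) c
    have := h.once v hvR
    rw [List.count_flatten] at this
    have hcc : 1 ≤ comps.count c := List.count_pos_iff.mpr hc
    simp only at hmul
    nlinarith
  · rw [List.count_eq_zero_of_not_mem hv]; omega

lemma pv_find_block {n comps} (h : CInv n comps) {a : Int} (ha : pvInR n a) :
    ∃ c, comps.find? (fun c => c.contains a) = some c ∧ c ∈ comps ∧ a ∈ c := by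
  rcases h.block_exists ha with ⟨c, hc, hac⟩
  have : (comps.find? (fun c => c.contains a)).isSome := by
    rw [List.find?_isSome]
    exact ⟨c, hc, by simpa using hac⟩
  rcases Option.isSome_iff_exists.mp this with ⟨c', hc'⟩
  refine ⟨c', hc', List.mem_of_find?_eq_some hc', ?_⟩
  have := List.find?_some hc'
  simpa using this

-- A's find: returns the root, preserves the invariant
lemma dsuFindA_spec {n : Nat} {ρ : Int → Int} {d : Int → Nat} {C : Nat} :
    ∀ (fuel : Nat) (p : List Int) (x : Int), DSUInv n p ρ d C → pvInR n x → d x < fuel →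
    (dsuFindA fuel p x).2 = ρ x ∧ DSUInv n (dsuFindA fuel p x).1 ρ d C := by
  intro fuel
  induction fuel with
  | zero => intro p x h hx hd; omega
  | succ fuel ih =>
    intro p x h hx hd
    by_cases hpx : PySem.List.pyGetD p x 0 = x
    · have hroot : x = ρ x := by
        by_contra hxr
        have := h.parent_dec x hx hxr
        rw [hpx] at this
        omega
      simp [dsuFindA, hpx]
      exact ⟨hroot, h⟩
    · have hxr : x ≠ ρ x := fun he => hpx (h.root_fix x hx he)
      have hpxR := h.parent_inR x hx
      have hppR := h.parent_inR _ hpxR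
      have hρpp : ρ (PySem.List.pyGetD p (PySem.List.pyGetD p x 0) 0) = ρ x := by
        rw [h.parent_root _ hpxR, h.parent_root x hx]
      have hdpp : d (PySem.List.pyGetD p (PySem.List.pyGetD p x 0) 0) < d x := by
        have h1 : d (PySem.List.pyGetD p x 0) < d x := h.parent_dec x hx hxr
        by_cases hq : PySem.List.pyGetD p x 0 = ρ (PySem.List.pyGetD p x 0)
        · rw [h.root_fix _ hpxR hq]; exact h1
        · have := h.parent_dec _ hpxR hq; omega
      have hInv' : DSUInv n (PySem.List.pySetD p x (PySem.List.pyGetD p (PySem.List.pyGetD p x 0) 0)) ρ d C := by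
        constructor
        · rw [PySem.List.length_pySetD]; exact h.len
        · exact h.root_inR
        · exact h.root_idem
        · exact h.d_root
        · intro y hy
          rw [pv_get_set p n h.len hx hy]
          split
          · exact hppR
          · exact h.parent_inR y hy
        · intro y hy
          rw [pv_get_set p n h.len hx hy]
          split
          next heq => rw [hρpp, heq]
          next => exact h.parent_root y hy
        · intro y hy hyr
          rw [pv_get_set p n h.len hx hy]
          split
          next heq => rw [heq] at hyr ⊢; omega
          next => exact h.parent_dec y hy hyr
        · intro y hy hyr
          rw [pv_get_set p n h.len hx hy]
          split
          next heq => exact absurd (heq ▸ hyr) hxr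
          next => exact h.root_fix y hy hyr
        · exact h.d_bound
      have hrec := ih _ _ hInv' hppR (by omega)
      simp [dsuFindA, hpx]
      rw [hrec.1, hρpp]
      exact ⟨rfl, hrec.2⟩

lemma dsuFindA_spec' {n : Nat} {ρ : Int → Int} {d : Int → Nat} {C : Nat}
    {p : List Int} {x : Int} (h : DSUInv n p ρ d C) (hx : pvInR n x) (hC : 1 ≤ C) :
    (dsuFindA p.length p x).2 = ρ x ∧ DSUInv n (dsuFindA p.length p x).1 ρ d C := by
  have hd : d x < p.length := by
    have := h.d_bound x hx
    rw [h.len]; omega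
  have := dsuFindA_spec p.length p x h hx hd
  exact this

-- linking root rb under root ra: the new invariant and the merged kernel
lemma pv_link_spec {n : Nat} {p : List Int} {ρ : Int → Int} {d : Int → Nat} {C : Nat}
    (h : DSUInv n p ρ d C) (hC2 : 2 ≤ C) {ra rb : Int}
    (hraR : pvInR n ra) (hrbR : pvInR n rb) (hra : ρ ra = ra) (hrb : ρ rb = rb)
    (hne : ra ≠ rb) :
    DSUInv n (PySem.List.pySetD p rb ra)
      (fun x => if ρ x = rb then ra else ρ x)
      (fun x => if ρ x = rb then d x + 1 else d x) (C - 1) := by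
  have hdra : d ra = 0 := by have := h.d_root ra hraR; rwa [hra] at this
  have hnra : ¬ ρ ra = rb := by rw [hra]; exact hne
  constructor
  · rw [PySem.List.length_pySetD]; exact h.len
  · intro x hx
    split
    · exact hraR
    · exact h.root_inR x hx
  · intro x hx
    by_cases h1 : ρ x = rb
    · rw [if_pos h1, if_neg hnra, hra]
    · rw [if_neg h1, if_neg (show ¬ ρ (ρ x) = rb by rw [h.root_idem x hx]; exact h1),
        h.root_idem x hx]
  · intro x hx
    by_cases h1 : ρ x = rb
    · rw [if_pos h1, if_neg hnra]
      exact hdra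
    · rw [if_neg h1, if_neg (show ¬ ρ (ρ x) = rb by rw [h.root_idem x hx]; exact h1)]
      exact h.d_root x hx
  · intro y hy
    rw [pv_get_set p n h.len hrbR hy]
    split
    · exact hraR
    · exact h.parent_inR y hy
  · intro y hy
    rw [pv_get_set p n h.len hrbR hy]
    by_cases hyrb : y = rb
    · rw [if_pos hyrb, hyrb, if_pos hrb, if_neg hnra, hra]
    · rw [if_neg hyrb, h.parent_root y hy]
  · intro y hy hyr
    rw [pv_get_set p n h.len hrbR hy]
    by_cases hyrb : y = rb
    · rw [if_pos hyrb, if_neg hnra, hdra, hyrb, if_pos hrb]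
      omega
    · rw [if_neg hyrb, h.parent_root y hy]
      by_cases h1 : ρ y = rb
      · have hyy : y ≠ ρ y := by rw [h1]; exact hyrb
        have hdec := h.parent_dec y hy hyy
        rw [if_pos h1, if_pos h1]
        omega
      · rw [if_neg h1, if_neg h1]
        exact h.parent_dec y hy (by
          intro hcon
          apply hyr
          rw [if_neg h1, ← hcon])
  · intro y hy hyr
    rw [pv_get_set p n h.len hrbR hy]
    by_cases hyrb : y = rb
    · exfalso
      rw [hyrb, if_pos hrb] at hyr
      exact hne (hyr ▸ rfl)
    · rw [if_neg hyrb]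
      by_cases h1 : ρ y = rb
      · exfalso
        rw [if_pos h1] at hyr
        rw [hyr, hra] at h1
        exact hne h1
      · rw [if_neg h1] at hyr
        exact h.root_fix y hy hyr
  · intro x hx
    have := h.d_bound x hx
    split <;> omega

lemma pv_link_kernel (ρ : Int → Int) (ra rb : Int) (x y : Int) :
    ((if ρ x = rb then ra else ρ x) = (if ρ y = rb then ra else ρ y)) ↔
      (ρ x = ρ y ∨ ((ρ x = ra ∨ ρ x = rb) ∧ (ρ y = ra ∨ ρ y = rb))) := by
  by_cases h1 : ρ x = rb <;> by_cases h2 : ρ y = rb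
  · rw [if_pos h1, if_pos h2]
    simp [h1, h2]
  · rw [if_pos h1, if_neg h2]
    constructor
    · intro hh
      exact Or.inr ⟨Or.inr h1, Or.inl hh.symm⟩
    · rintro (hh | ⟨_, (hy | hy)⟩)
      · exact absurd (hh.symm.trans h1) h2
      · exact hy.symm
      · exact absurd hy h2
  · rw [if_neg h1, if_pos h2]
    constructor
    · intro hh
      exact Or.inr ⟨Or.inl hh, Or.inr h2⟩
    · rintro (hh | ⟨(hx | hx), _⟩)
      · exact absurd (hh.trans h2) h1
      · exact hx
      · exact absurd hx h1
  · rw [if_neg h1, if_neg h2]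
    constructor
    · exact Or.inl
    · rintro (hh | ⟨(hx | hx), (hy | hy)⟩)
      · exact hh
      · exact hx.trans hy.symm
      · exact absurd hy h2
      · exact absurd hx h1
      · exact absurd hx h1

-- A's union: characterized by its effect on the root partition
lemma dsuUnionA_spec {n : Nat} {ρ : Int → Int} {d : Int → Nat} {C : Nat}
    {p : List Int} (s : List Int) {a b : Int}
    (h : DSUInv n p ρ d C) (hC : 1 ≤ C) (ha : pvInR n a) (hb : pvInR n b) :
    (ρ a = ρ b → DSUInv n (dsuUnionA p s a b).1 ρ d C) ∧
    (ρ a ≠ ρ b → 2 ≤ C → ∃ ρ' d', DSUInv n (dsuUnionA p s a b).1 ρ' d' (C - 1) ∧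
      ∀ x y, pvInR n x → pvInR n y →
        (ρ' x = ρ' y ↔ (ρ x = ρ y ∨ ((ρ x = ρ a ∨ ρ x = ρ b) ∧ (ρ y = ρ a ∨ ρ y = ρ b))))) := by
  have h1 := dsuFindA_spec' h ha hC
  have h2 := dsuFindA_spec' h1.2 hb hC
  constructor
  · intro heq
    simp only [dsuUnionA]
    rw [h1.1, h2.1, if_pos heq]
    exact h2.2
  · intro hneq hC2
    have hInv2 := h2.2
    have hraR := hInv2.root_inR a ha
    have hrbR := hInv2.root_inR b hb
    have hra : ρ (ρ a) = ρ a := hInv2.root_idem a ha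
    have hrb : ρ (ρ b) = ρ b := hInv2.root_idem b hb
    simp only [dsuUnionA]
    rw [h1.1, h2.1, if_neg hneq]
    by_cases hsz : PySem.List.pyGetD s (ρ a) 0 < PySem.List.pyGetD s (ρ b) 0
    · rw [if_pos hsz]
      refine ⟨fun x => if ρ x = ρ a then ρ b else ρ x,
              fun x => if ρ x = ρ a then d x + 1 else d x, ?_, ?_⟩
      · exact pv_link_spec hInv2 hC2 hrbR hraR hrb hra (fun hh => hneq hh.symm)
      · intro x y hx hy
        rw [pv_link_kernel ρ (ρ b) (ρ a) x y]
        tauto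
    · rw [if_neg hsz]
      refine ⟨fun x => if ρ x = ρ b then ρ a else ρ x,
              fun x => if ρ x = ρ b then d x + 1 else d x, ?_, ?_⟩
      · exact pv_link_spec hInv2 hC2 hraR hrbR hra hrb hneq
      · intro x y hx hy
        rw [pv_link_kernel ρ (ρ a) (ρ b) x y]

-- the two loop bodies preserve the joint invariant
lemma pv_step_equiv {n : Nat} {p : List Int} (s : List Int) {comps : List (List Int)}
    (hJ : JInv n p comps) (e : Int × Int × Int) (ha : pvInR n e.2.1) (hb : pvInR n e.2.2) :
    JInv n (stepA (p, s) e).1 (stepB comps e) := by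
  obtain ⟨ρ, d, hInv, hCI, hker⟩ := hJ
  obtain ⟨ca, hfa, hcaM, haca⟩ := pv_find_block hCI ha
  obtain ⟨cb, hfb, hcbM, hbcb⟩ := pv_find_block hCI hb
  have hC1 : 1 ≤ comps.length :=
    List.length_pos_of_ne_nil (by rintro rfl; simp at hcaM)
  have hspec := dsuUnionA_spec s hInv hC1 ha hb
  by_cases heq : ρ e.2.1 = ρ e.2.2
  · obtain ⟨c, hcM, hac, hbc⟩ := (hker _ _ ha hb).mp heq
    have hceq : ca = cb := by
      rw [hCI.block_unique ha hcaM hcM haca hac, hCI.block_unique hb hcbM hcM hbcb hbc]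
    have hstepB : stepB comps e = comps := by
      simp only [stepB, hfa, hfb, Option.getD_some]
      rw [if_pos hceq]
    rw [hstepB]
    exact ⟨ρ, d, by simpa [stepA] using hspec.1 heq, hCI, hker⟩
  · have hne : ca ≠ cb := fun hh =>
      heq ((hker _ _ ha hb).mpr ⟨ca, hcaM, haca, hh ▸ hbcb⟩)
    have hstepB : stepB comps e =
        (ca ++ cb) :: comps.filter (fun c => c != ca && c != cb) := by
      simp only [stepB, hfa, hfb, Option.getD_some]
      rw [if_neg hne]
    have hfp : (comps.filter (fun c => c == ca || c == cb)).Perm [ca, cb] := by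
      rw [List.perm_iff_count]
      intro v
      by_cases hva : v = ca
      · rw [hva, List.count_filter (by simp)]
        rw [hCI.count_one hcaM]
        have h9 : List.count ca [ca, cb] = 1 := by simp [hne]
        omega
      · by_cases hvb : v = cb
        · rw [hvb, List.count_filter (by simp)]
          rw [hCI.count_one hcbM]
          have h9 : List.count cb [ca, cb] = 1 := by simp [hne]
          omega
        · rw [List.count_eq_zero_of_not_mem (fun hv => by
            rcases List.mem_filter.mp hv with ⟨_, hp⟩
            simp at hp
            tauto)]
          have : v ∉ [ca, cb] := by simp [hva, hvb]
          rw [List.count_eq_zero_of_not_mem this]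
    have hnotp : ∀ c : List Int, (!(c == ca || c == cb)) = (c != ca && c != cb) := by
      intro c
      simp [Bool.not_or, bne]
    have hperm : comps.Perm (ca :: cb :: comps.filter (fun c => c != ca && c != cb)) := by
      have h0 := (List.filter_append_perm (fun c => c == ca || c == cb) comps).symm
      have h1 : (List.filter (fun c => !(c == ca || c == cb)) comps)
          = comps.filter (fun c => c != ca && c != cb) := by
        apply List.filter_congr
        intro c _
        exact hnotp c
      rw [h1] at h0
      exact h0.trans (hfp.append_right _)
    have hlen : comps.length = (comps.filter (fun c => c != ca && c != cb)).length + 2 := by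
      have := hperm.length_eq
      simpa using this
    have hC2 : 2 ≤ comps.length := by omega
    obtain ⟨ρ', d', hInv', hker'⟩ := hspec.2 heq hC2
    rw [hstepB]
    refine ⟨ρ', d', ?_, ?_, ?_⟩
    · have hlen2 : ((ca ++ cb) :: comps.filter (fun c => c != ca && c != cb)).length
          = comps.length - 1 := by
        simp only [List.length_cons]
        omega
      rw [hlen2]
      simpa [stepA] using hInv'
    · constructor
      · intro c hc
        rcases List.mem_cons.mp hc with rfl | hcr
        · have := hCI.ne ca hcaM
          intro hh
          rcases List.append_eq_nil_iff.mp hh with ⟨h1, _⟩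
          exact this h1
        · exact hCI.ne c (List.mem_filter.mp hcr).1
      · intro c hc v hv
        rcases List.mem_cons.mp hc with rfl | hcr
        · rcases List.mem_append.mp hv with h | h
          · exact hCI.inR ca hcaM v h
          · exact hCI.inR cb hcbM v h
        · exact hCI.inR c (List.mem_filter.mp hcr).1 v hv
      · intro x hx
        have h1 := hCI.once x hx
        have h2 := (hperm.flatten.count_eq) x
        rw [h2] at h1
        simp only [List.flatten_cons, List.count_append] at h1 ⊢
        omega
    · intro x y hx hy
      rw [hker' x y hx hy]
      have hblock : ∀ z, pvInR n z → z ∈ ca → ∀ c ∈ comps, e.2.1 ∈ c → c = ca :=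
        fun z hz hzca c hcM hac' => hCI.block_unique ha hcM hcaM hac' haca
      have hxa : ρ x = ρ e.2.1 ↔ x ∈ ca := by
        rw [hker x e.2.1 hx ha]
        constructor
        · rintro ⟨c, hcM, hxc, hac'⟩
          rwa [hCI.block_unique ha hcM hcaM hac' haca] at hxc
        · intro hxca
          exact ⟨ca, hcaM, hxca, haca⟩
      have hxb : ρ x = ρ e.2.2 ↔ x ∈ cb := by
        rw [hker x e.2.2 hx hb]
        constructor
        · rintro ⟨c, hcM, hxc, hbc'⟩
          rwa [hCI.block_unique hb hcM hcbM hbc' hbcb] at hxc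
        · intro hxcb
          exact ⟨cb, hcbM, hxcb, hbcb⟩
      have hya : ρ y = ρ e.2.1 ↔ y ∈ ca := by
        rw [hker y e.2.1 hy ha]
        constructor
        · rintro ⟨c, hcM, hyc, hac'⟩
          rwa [hCI.block_unique ha hcM hcaM hac' haca] at hyc
        · intro hyca
          exact ⟨ca, hcaM, hyca, haca⟩
      have hyb : ρ y = ρ e.2.2 ↔ y ∈ cb := by
        rw [hker y e.2.2 hy hb]
        constructor
        · rintro ⟨c, hcM, hyc, hbc'⟩
          rwa [hCI.block_unique hb hcM hcbM hbc' hbcb] at hyc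
        · intro hycb
          exact ⟨cb, hcbM, hycb, hbcb⟩
      rw [hker x y hx hy, hxa, hxb, hya, hyb]
      constructor
      · rintro (⟨c, hcM, hxc, hyc⟩ | ⟨hxm, hym⟩)
        · by_cases hca : c = ca
          · subst hca
            exact ⟨c ++ cb, List.mem_cons_self, List.mem_append_left _ hxc,
              List.mem_append_left _ hyc⟩
          · by_cases hcb : c = cb
            · subst hcb
              exact ⟨ca ++ c, List.mem_cons_self, List.mem_append_right _ hxc,
                List.mem_append_right _ hyc⟩
            · exact ⟨c, List.mem_cons_of_mem _ (List.mem_filter.mpr ⟨hcM, by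
                simp [hca, hcb]⟩), hxc, hyc⟩
        · refine ⟨ca ++ cb, List.mem_cons_self, ?_, ?_⟩
          · rcases hxm with h | h
            · exact List.mem_append_left _ h
            · exact List.mem_append_right _ h
          · rcases hym with h | h
            · exact List.mem_append_left _ h
            · exact List.mem_append_right _ h
      · rintro ⟨c', hc'M, hxc', hyc'⟩
        rcases List.mem_cons.mp hc'M with rfl | hcr
        · exact Or.inr ⟨List.mem_append.mp hxc', List.mem_append.mp hyc'⟩
        · exact Or.inl ⟨c', (List.mem_filter.mp hcr).1, hxc', hyc'⟩

lemma pv_loop_equiv {n : Nat} :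
    ∀ (E : List (Int × Int × Int)) (st : List Int × List Int) (comps : List (List Int)),
    (∀ e ∈ E, pvInR n e.2.1 ∧ pvInR n e.2.2) → JInv n st.1 comps →
    JInv n (E.foldl stepA st).1 (E.foldl stepB comps) := by
  intro E
  induction E with
  | nil => intro st comps _ hJ; exact hJ
  | cons e E ih =>
    intro st comps hR hJ
    simp only [List.foldl_cons]
    have h1 : JInv n (stepA st e).1 (stepB comps e) := by
      have := pv_step_equiv st.2 hJ e (hR e List.mem_cons_self).1 (hR e List.mem_cons_self).2
      exact this
    exact ih (stepA st e) (stepB comps e) (fun e' he' => hR e' (List.mem_cons_of_mem _ he')) h1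

lemma pv_JInv_init (n : Nat) :
    JInv n (PySem.List.pyRange 0 (n : Int)) ((PySem.List.pyRange 0 (n : Int)).map (fun i => [i])) := by
  have hlen : (PySem.List.pyRange 0 (n : Int)).length = n := by
    rw [PySem.List.length_pyRange_one]; omega
  have hget : ∀ x : Int, pvInR n x → PySem.List.pyGetD (PySem.List.pyRange 0 (n : Int)) x 0 = x := by
    intro x hx
    obtain ⟨hx0, hxn⟩ := hx
    rw [PySem.List.pyGetD_eq_getElem _ 0 hx0 (by rw [hlen]; omega),
      PySem.List.getElem_pyRange_one]
    omega
  have hmemr : ∀ x : Int, pvInR n x ↔ x ∈ PySem.List.pyRange 0 (n : Int) := by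
    intro x
    rw [PySem.List.mem_pyRange_one]
    exact Iff.rfl
  refine ⟨fun x => x, fun _ => 0, ?_, ?_, ?_⟩
  · constructor
    · exact hlen
    · exact fun x hx => hx
    · exact fun x _ => rfl
    · exact fun x _ => rfl
    · intro x hx; rw [hget x hx]; exact hx
    · intro x hx; rw [hget x hx]
    · intro x _ hx; exact absurd rfl hx
    · intro x hx _; exact hget x hx
    · intro x _
      simp only [List.length_map, hlen]
      omega
  · constructor
    · intro c hc
      rcases List.mem_map.mp hc with ⟨i, _, rfl⟩
      simp
    · intro c hc v hv
      rcases List.mem_map.mp hc with ⟨i, hi, rfl⟩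
      rcases List.mem_singleton.mp hv with rfl
      exact (hmemr v).mpr hi
    · intro x hx
      have hflat : ∀ l : List Int, (l.map (fun i => [i])).flatten = l := by
        intro l
        induction l with
        | nil => simp
        | cons a l ih => simp [ih]
      rw [hflat]
      exact List.count_eq_one_of_mem (PySem.List.nodup_pyRange_one 0 (n : Int))
        ((hmemr x).mp hx)
  · intro x y hx hy
    constructor
    · rintro rfl
      exact ⟨[x], List.mem_map.mpr ⟨x, (hmemr x).mp hx, rfl⟩, List.mem_singleton.mpr rfl,
        List.mem_singleton.mpr rfl⟩
    · rintro ⟨c, hc, hxc, hyc⟩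
      rcases List.mem_map.mp hc with ⟨i, _, rfl⟩
      rw [List.mem_singleton.mp hxc, List.mem_singleton.mp hyc]

-- A's counting loop computes the counter of the root of every vertex
lemma pv_count_loop {n : Nat} {ρ : Int → Int} {d : Int → Nat} {C : Nat}
    {p : List Int} (h : DSUInv n p ρ d C) (hC : 1 ≤ C) :
    ((PySem.List.pyRange 0 (n : Int)).foldl (fun st2 i =>
        let r := dsuFindA st2.1.length st2.1 i
        (r.1, st2.2.insert r.2 (st2.2.getD r.2 0 + 1)))
      (p, (PySem.Dict.empty : PySem.Dict Int Int))).2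
    = PySem.Dict.counter ((PySem.List.pyRange 0 (n : Int)).map ρ) := by
  have main : ∀ m : Nat, m ≤ n →
      DSUInv n (((PySem.List.pyRange 0 (m : Int)).foldl (fun st2 i =>
          let r := dsuFindA st2.1.length st2.1 i
          (r.1, st2.2.insert r.2 (st2.2.getD r.2 0 + 1)))
        (p, (PySem.Dict.empty : PySem.Dict Int Int))).1) ρ d C ∧
      (((PySem.List.pyRange 0 (m : Int)).foldl (fun st2 i =>
          let r := dsuFindA st2.1.length st2.1 i
          (r.1, st2.2.insert r.2 (st2.2.getD r.2 0 + 1)))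
        (p, (PySem.Dict.empty : PySem.Dict Int Int))).2)
        = ((PySem.List.pyRange 0 (m : Int)).map ρ).foldl
            (fun dct r => dct.insert r (dct.getD r 0 + 1)) PySem.Dict.empty := by
    intro m
    induction m with
    | zero =>
      intro _
      simp only [Nat.cast_zero, PySem.List.pyRange_one_eq_nil (le_refl 0), List.foldl_nil,
        List.map_nil]
      exact ⟨h, trivial⟩
    | succ m ih =>
      intro hm
      have hm' : m ≤ n := by omega
      obtain ⟨ihInv, ihD⟩ := ih hm'
      have hcast : ((m + 1 : Nat) : Int) = (m : Int) + 1 := by push_cast; ring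
      rw [hcast, PySem.List.pyRange_one_succ_right (by positivity), List.foldl_append,
        List.map_append, List.foldl_append]
      simp only [List.foldl_cons, List.foldl_nil, List.map_cons, List.map_nil]
      have hmR : pvInR n (m : Int) := ⟨by positivity, by exact_mod_cast hm⟩
      have hfind := dsuFindA_spec' ihInv hmR hC
      constructor
      · exact hfind.2
      · rw [ihD, hfind.1]
  rw [(main n (le_refl n)).2, PySem.Dict.foldl_insert_getD_add_one_eq_counter]

-- the counter values are a permutation of the block sizes
lemma pv_values_perm {n : Nat} {ρ : Int → Int} {comps : List (List Int)}
    (hC : CInv n comps)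
    (hker : ∀ x y, pvInR n x → pvInR n y → (ρ x = ρ y ↔ SameBlock comps x y))
    (hroot_inR : ∀ x, pvInR n x → pvInR n (ρ x))
    (hidem : ∀ x, pvInR n x → ρ (ρ x) = ρ x) :
    (PySem.Dict.counter ((PySem.List.pyRange 0 (n : Int)).map ρ)).values.Perm
      (comps.map (fun c => PySem.List.len c)) := by
  have hvals : (PySem.Dict.counter ((PySem.List.pyRange 0 (n : Int)).map ρ)).values
      = (PySem.Set.ofList ((PySem.List.pyRange 0 (n : Int)).map ρ)).map
          (fun k => ((((PySem.List.pyRange 0 (n : Int)).map ρ).count k : Nat) : Int)) := by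
    simp only [PySem.Dict.values, PySem.Dict.items_counter, List.map_map]
    rfl
  have hmemK : ∀ r, r ∈ PySem.Set.ofList ((PySem.List.pyRange 0 (n : Int)).map ρ) ↔
      ∃ x, pvInR n x ∧ ρ x = r := by
    intro r
    rw [PySem.Set.mem_ofList, List.mem_map]
    constructor
    · rintro ⟨x, hx, rfl⟩
      exact ⟨x, PySem.List.mem_pyRange_one.mp hx, rfl⟩
    · rintro ⟨x, hx, rfl⟩
      exact ⟨x, PySem.List.mem_pyRange_one.mpr hx, rfl⟩
  have hrootK : ∀ r, r ∈ PySem.Set.ofList ((PySem.List.pyRange 0 (n : Int)).map ρ) →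
      pvInR n r ∧ ρ r = r := by
    intro r hr
    rcases (hmemK r).mp hr with ⟨x, hx, rfl⟩
    exact ⟨hroot_inR x hx, hidem x hx⟩
  have hFspec : ∀ r, pvInR n r →
      ((comps.find? (fun c => c.contains r)).getD [] ∈ comps ∧
        r ∈ (comps.find? (fun c => c.contains r)).getD []) := by
    intro r hr
    rcases pv_find_block hC hr with ⟨c, hfind, hcM, hrc⟩
    rw [hfind]
    exact ⟨hcM, hrc⟩
  have hxF : ∀ r, pvInR n r → ρ r = r → ∀ x, pvInR n x →
      (ρ x = r ↔ x ∈ (comps.find? (fun c => c.contains r)).getD []) := by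
    intro r hr hrr x hx
    obtain ⟨hFM, hrF⟩ := hFspec r hr
    constructor
    · intro hxr
      have hSB : SameBlock comps x r := (hker x r hx hr).mp (by rw [hxr, hrr])
      rcases hSB with ⟨c, hcM, hxc, hrc⟩
      rwa [hC.block_unique hr hcM hFM hrc hrF] at hxc
    · intro hxFr
      have : ρ x = ρ r := (hker x r hx hr).mpr ⟨_, hFM, hxFr, hrF⟩
      rwa [hrr] at this
  have hinj : ∀ r1 ∈ PySem.Set.ofList ((PySem.List.pyRange 0 (n : Int)).map ρ),
      ∀ r2 ∈ PySem.Set.ofList ((PySem.List.pyRange 0 (n : Int)).map ρ),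
      (comps.find? (fun c => c.contains r1)).getD [] =
        (comps.find? (fun c => c.contains r2)).getD [] → r1 = r2 := by
    intro r1 h1 r2 h2 hFF
    obtain ⟨h1R, h1r⟩ := hrootK r1 h1
    obtain ⟨h2R, h2r⟩ := hrootK r2 h2
    obtain ⟨hFM1, hrF1⟩ := hFspec r1 h1R
    obtain ⟨hFM2, hrF2⟩ := hFspec r2 h2R
    have hSB : SameBlock comps r1 r2 := ⟨_, hFM1, hrF1, hFF ▸ hrF2⟩
    have := (hker r1 r2 h1R h2R).mpr hSB
    rw [h1r, h2r] at this
    exact this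
  have hKF_perm : ((PySem.Set.ofList ((PySem.List.pyRange 0 (n : Int)).map ρ)).map
      (fun r => (comps.find? (fun c => c.contains r)).getD [])).Perm comps := by
    rw [List.perm_ext_iff_of_nodup
      (List.Nodup.map_on hinj (PySem.Set.nodup_ofList _)) hC.nodup]
    intro c
    constructor
    · intro hcm
      rcases List.mem_map.mp hcm with ⟨r, hrK, rfl⟩
      exact (hFspec r (hrootK r hrK).1).1
    · intro hcM
      rcases List.exists_mem_of_ne_nil c (hC.ne c hcM) with ⟨v, hv⟩
      have hvR := hC.inR c hcM v hv
      have hrK : ρ v ∈ PySem.Set.ofList ((PySem.List.pyRange 0 (n : Int)).map ρ) :=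
        (hmemK (ρ v)).mpr ⟨v, hvR, rfl⟩
      refine List.mem_map.mpr ⟨ρ v, hrK, ?_⟩
      obtain ⟨hρR, hρr⟩ := hrootK (ρ v) hrK
      have hvF : v ∈ (comps.find? (fun c => c.contains (ρ v))).getD [] :=
        (hxF (ρ v) hρR hρr v hvR).mp rfl
      exact hC.block_unique hvR (hFspec (ρ v) hρR).1 hcM hvF hv
  have hcount : ∀ r ∈ PySem.Set.ofList ((PySem.List.pyRange 0 (n : Int)).map ρ),
      ((((PySem.List.pyRange 0 (n : Int)).map ρ).count r : Nat) : Int)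
        = PySem.List.len ((comps.find? (fun c => c.contains r)).getD []) := by
    intro r hrK
    obtain ⟨hrR, hrr⟩ := hrootK r hrK
    obtain ⟨hFM, hrF⟩ := hFspec r hrR
    rw [PySem.List.len_eq]
    congr 1
    rw [List.count_eq_countP, List.countP_map]
    have hstep : List.countP ((fun x => x == r) ∘ ρ) (PySem.List.pyRange 0 (n : Int))
        = List.countP (fun x => decide (x ∈ (comps.find? (fun c => c.contains r)).getD []))
            (PySem.List.pyRange 0 (n : Int)) := by
      apply List.countP_congr
      intro x hx
      have hxR : pvInR n x := PySem.List.mem_pyRange_one.mp hx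
      simp only [Function.comp, beq_iff_eq, decide_eq_true_eq]
      exact hxF r hrR hrr x hxR
    rw [hstep, List.countP_eq_length_filter]
    have hperm2 : (List.filter (fun x =>
        decide (x ∈ (comps.find? (fun c => c.contains r)).getD []))
        (PySem.List.pyRange 0 (n : Int))).Perm
        ((comps.find? (fun c => c.contains r)).getD []) := by
      rw [List.perm_ext_iff_of_nodup
        ((PySem.List.nodup_pyRange_one 0 (n : Int)).filter _) (hC.block_nodup hFM)]
      intro v
      rw [List.mem_filter]
      constructor
      · rintro ⟨_, hv⟩
        simpa using hv
      · intro hv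
        refine ⟨?_, by simpa using hv⟩
        exact PySem.List.mem_pyRange_one.mpr (hC.inR _ hFM v hv)
    exact hperm2.length_eq
  rw [hvals, List.map_congr_left hcount]
  have hmm : (PySem.Set.ofList ((PySem.List.pyRange 0 (n : Int)).map ρ)).map
        (fun r => PySem.List.len ((comps.find? (fun c => c.contains r)).getD []))
      = ((PySem.Set.ofList ((PySem.List.pyRange 0 (n : Int)).map ρ)).map
        (fun r => (comps.find? (fun c => c.contains r)).getD [])).map
        (fun c => PySem.List.len c) := by
    rw [List.map_map]
    rfl
  rw [hmm]
  exact hKF_perm.map _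

-- a reverse-sorted list is determined by the multiset
lemma pv_sorted_rev_eq_of_perm (xs ys : List Int) (h : xs.Perm ys) :
    PySem.List.sorted xs (fun v => v) true = PySem.List.sorted ys (fun v => v) true := by
  have p1 : (PySem.List.sorted xs (fun v => v) true).Perm (PySem.List.sorted ys (fun v => v) true) :=
    (PySem.List.sorted_perm xs (fun v => v) true).trans
      (h.trans (PySem.List.sorted_perm ys (fun v => v) true).symm)
  exact List.Perm.eq_of_pairwise (fun a b _ _ h1 h2 => le_antisymm h2 h1)
    (PySem.List.sorted_pairwise_rev xs (fun v => v))
    (PySem.List.sorted_pairwise_rev ys (fun v => v)) p1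

-- the two parsers agree
lemma pv_parse_eq (data : List String) : parsePointsB data = parsePointsA data := by
  induction data with
  | nil => rfl
  | cons l ls ih =>
    by_cases hs : PySem.Str.strip l = ""
    · simp only [parsePointsA, parsePointsB, List.map_cons, List.filter_cons, hs]
      simp only [bne_self_eq_false]
      simpa [parsePointsB] using ih
    · have hbne : (PySem.Str.strip l != "") = true := by simp [hs]
      simp only [parsePointsA, parsePointsB, List.map_cons, List.filter_cons, hbne,
        if_pos, List.mapM_cons]
      have hB : ((ls.map PySem.Str.strip).filter (fun s => s != "")).mapM parseRowB
          = parsePointsA ls := ih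
      cases hsp : PySem.Str.split? (PySem.Str.strip l) "," with
      | none => simp [parseRowB, hsp, hs]
      | some parts =>
        match parts with
        | [] => simp [parseRowB, hsp, hs]
        | [x] => simp [parseRowB, hsp, hs]
        | [x, y] => simp [parseRowB, hsp, hs]
        | x :: y :: z :: w :: rest => simp [parseRowB, hsp, hs]
        | [x, y, z] =>
          cases hx : PySem.Int.ofStr? x with
          | none => simp [parseRowB, hsp, hx, hs]
          | some a =>
            cases hy : PySem.Int.ofStr? y with
            | none => simp [parseRowB, hsp, hx, hy, hs]
            | some b =>
              cases hz : PySem.Int.ofStr? z with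
              | none => simp [parseRowB, hsp, hx, hy, hz, hs]
              | some c =>
                simp [parseRowB, hsp, hx, hy, hz, hB, hs]
                cases parsePointsA ls <;> rfl

-- the edge value A and B both produce for the pair (i, j)
def pvEdge (points : List (Int × Int × Int)) (i j : Int) : Int × Int × Int :=
  let p := PySem.List.pyGetD points i (0, 0, 0)
  let q := PySem.List.pyGetD points j (0, 0, 0)
  ((p.1 - q.1) * (p.1 - q.1) + (p.2.1 - q.2.1) * (p.2.1 - q.2.1) +
    (p.2.2 - q.2.2) * (p.2.2 - q.2.2), i, j)

-- A's nested append loops in flatMap/map form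
lemma pv_genA (points : List (Int × Int × Int)) :
    computeEdgesA points = PySem.List.sorted
      ((PySem.List.pyRange 0 (PySem.List.len points)).flatMap (fun i =>
        (PySem.List.pyRange (i + 1) (PySem.List.len points)).map (fun j => pvEdge points i j)))
      (fun e => e.1) false := by
  simp only [computeEdgesA, pvEdge]
  congr 1
  simp only [PySem.List.foldl_append_singleton_eq_map, PySem.List.foldl_append_eq_flatMap,
    List.nil_append]

-- the two edge computations agree
lemma pv_edges_eq (points : List (Int × Int × Int)) :
    computeEdgesB points = computeEdgesA points := by
  rw [pv_genA]
  simp only [computeEdgesB]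
  congr 1
  rw [PySem.List.enumerate_eq_map_pyRange points (0, 0, 0), List.flatMap_map]
  apply List.flatMap_congr
  intro i hi
  simp only []
  rcases PySem.List.mem_pyRange_one.mp hi with ⟨hi0, hin⟩
  rw [PySem.List.len_eq] at hin
  have hlen_drop : (PySem.List.enumerate (points.drop (i + 1).toNat) (i + 1)).length
      = points.length - (i + 1).toNat := by
    rw [PySem.List.length_enumerate, List.length_drop]
  rw [PySem.List.slice_from points (by omega)]
  apply List.ext_getElem
  · simp only [List.length_map, hlen_drop, PySem.List.length_pyRange_one, PySem.List.len_eq]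
    omega
  · intro k hk1 hk2
    simp only [List.length_map, hlen_drop] at hk1
    simp only [List.length_map, PySem.List.length_pyRange_one, PySem.List.len_eq] at hk2
    simp only [List.getElem_map]
    rw [PySem.List.getElem_enumerate _ _ k (by rw [hlen_drop]; omega)]
    rw [PySem.List.getElem_pyRange_one _ _ k (by
      rw [PySem.List.length_pyRange_one, PySem.List.len_eq]
      omega)]
    have hq : (points.drop (i + 1).toNat)[k]'(by rw [List.length_drop]; omega)
        = points[(i + 1).toNat + k]'(by omega) := List.getElem_drop
    simp only [hq, pvEdge]
    have hpi : PySem.List.pyGetD points i (0, 0, 0) = points[i.toNat]'(by omega) :=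
      PySem.List.pyGetD_eq_getElem points (0, 0, 0) hi0 (by omega)
    have hj0 : (0 : Int) ≤ i + 1 + (k : Int) := by omega
    have hjn : i + 1 + (k : Int) < (points.length : Int) := by omega
    have hpj : PySem.List.pyGetD points (i + 1 + (k : Int)) (0, 0, 0)
        = points[(i + 1 + (k : Int)).toNat]'(by omega) :=
      PySem.List.pyGetD_eq_getElem points (0, 0, 0) hj0 (by omega)
    have hidx : (i + 1 + (k : Int)).toNat = (i + 1).toNat + k := by omega
    rw [hpj]
    have heq : points[(i + 1 + (k : Int)).toNat]'(by omega) = points[(i + 1).toNat + k]'(by omega) :=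
      getElem_congr rfl hidx (by omega)
    rw [heq, hpi]
    refine Prod.ext ?_ rfl
    simp only
    ring

-- every generated edge has both endpoints in range
lemma pv_edges_inR (points : List (Int × Int × Int)) {e : Int × Int × Int}
    (he : e ∈ computeEdgesA points) : pvInR points.length e.2.1 ∧ pvInR points.length e.2.2 := by
  rw [pv_genA] at he
  rw [PySem.List.mem_sorted] at he
  rcases List.mem_flatMap.mp he with ⟨i, hi, hmem⟩
  rcases List.mem_map.mp hmem with ⟨j, hj, rfl⟩
  rcases PySem.List.mem_pyRange_one.mp hi with ⟨hi0, hin⟩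
  rcases PySem.List.mem_pyRange_one.mp hj with ⟨hj0, hjn⟩
  rw [PySem.List.len_eq] at hin hjn
  simp only [pvEdge]
  exact ⟨⟨hi0, by exact_mod_cast hin⟩, ⟨by omega, by exact_mod_cast hjn⟩⟩

-- the index loop over the first `limit` edges is a fold over a take, and equals B's slice
lemma pv_loop_input_eq (edges : List (Int × Int × Int)) (ncl : Int) (st : List Int × List Int) :
    (PySem.List.pyRange 0 (min ncl (PySem.List.len edges))).foldl
      (fun st k => stepA st (PySem.List.pyGetD edges k (0, 0, 0))) st
    = (PySem.List.slice edges none (some (max 0 ncl))).foldl stepA st := by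
  have key : ∀ t : Nat, t ≤ edges.length →
      (PySem.List.pyRange 0 (t : Int)).foldl
        (fun st k => stepA st (PySem.List.pyGetD edges k (0, 0, 0))) st
      = (edges.take t).foldl stepA st := by
    intro t ht
    have hlen : PySem.List.len (edges.take t) = (t : Int) := by
      rw [PySem.List.len_eq, List.length_take]
      omega
    rw [← hlen]
    have hcongr : (PySem.List.pyRange 0 (PySem.List.len (edges.take t))).foldl
        (fun st k => stepA st (PySem.List.pyGetD edges k (0, 0, 0))) st
        = (PySem.List.pyRange 0 (PySem.List.len (edges.take t))).foldl
        (fun st k => stepA st (PySem.List.pyGetD (edges.take t) k (0, 0, 0))) st := by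
      apply PySem.List.foldl_congr_mem
      intro acc k hk
      rcases PySem.List.mem_pyRange_one.mp hk with ⟨hk0, hkt⟩
      rw [hlen] at hkt
      congr 1
      rw [PySem.List.pyGetD_eq_getElem edges (0, 0, 0) hk0 (by omega),
        PySem.List.pyGetD_eq_getElem (edges.take t) (0, 0, 0) hk0 (by
          rw [List.length_take]
          omega)]
      exact (List.getElem_take).symm
    rw [hcongr, PySem.List.foldl_pyRange_pyGetD (edges.take t) (0, 0, 0) stepA st (le_refl 0)]
    simp
  by_cases hneg : ncl ≤ 0
  · have h1 : min ncl (PySem.List.len edges) ≤ 0 := by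
      rw [PySem.List.len_eq]
      exact le_trans (min_le_left _ _) hneg
    rw [PySem.List.pyRange_one_eq_nil h1, List.foldl_nil]
    have h2 : max 0 ncl = 0 := by omega
    rw [h2, PySem.List.slice_to edges (le_refl 0)]
    simp
  · have hpos : 0 < ncl := by omega
    have h2 : max 0 ncl = ncl := by omega
    rw [h2, PySem.List.slice_to edges (by omega), PySem.List.len_eq]
    rcases le_or_gt ncl (edges.length : Int) with hc | hc
    · rw [min_eq_left hc]
      have : ncl = ((ncl.toNat : Nat) : Int) := by omega
      rw [this]
      exact key ncl.toNat (by omega)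
    · rw [min_eq_right (le_of_lt hc)]
      have h3 : edges.take ncl.toNat = edges.take edges.length := by
        rw [List.take_eq_take_iff]
        omega
      rw [h3]
      exact key edges.length (le_refl _)

lemma pv_pre_parse {data : List String} (h : ∀ l ∈ data,
      PySem.Str.strip l = "" ∨
      ((PySem.Str.split? (PySem.Str.strip l) ",").getD []).length = 3 ∧
        ∀ p ∈ (PySem.Str.split? (PySem.Str.strip l) ",").getD [], (PySem.Int.ofStr? p).isSome) :
    (parsePointsA data).isSome := by
  induction data with
  | nil => simp [parsePointsA]
  | cons l ls ih =>
    have hl := h l List.mem_cons_self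
    have hrest := ih (fun l' hl' => h l' (List.mem_cons_of_mem _ hl'))
    by_cases hs : PySem.Str.strip l = ""
    · simpa [parsePointsA, hs] using hrest
    · rcases hl with hs' | ⟨hlen, hall⟩
      · exact absurd hs' hs
      · cases hsp : PySem.Str.split? (PySem.Str.strip l) "," with
        | none => rw [hsp] at hlen; simp at hlen
        | some parts =>
          rw [hsp] at hlen hall
          simp only [Option.getD_some] at hlen hall
          match parts, hlen with
          | [x, y, z], _ =>
            have hx := hall x (by simp)
            have hy := hall y (by simp)
            have hz := hall z (by simp)
            rcases Option.isSome_iff_exists.mp hx with ⟨a, hx⟩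
            rcases Option.isSome_iff_exists.mp hy with ⟨b, hy⟩
            rcases Option.isSome_iff_exists.mp hz with ⟨c, hz⟩
            simp only [parsePointsA, hs, hsp, hx, hy, hz]
            rcases Option.isSome_iff_exists.mp hrest with ⟨r, hr⟩
            simp [hr]

-- ===== VERDICT (by name: the statement is the Claim_ definition above) =====
theorem part1_spec : Claim_equal_part1 := by
  intro data ncl hdom hpre
  unfold Spec_part1
  have hsome : (parsePointsA data).isSome := pv_pre_parse hpre
  obtain ⟨pts, hpts⟩ := Option.isSome_iff_exists.mp hsome
  simp only [part1, part1_alt, pv_parse_eq, hpts]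
  by_cases hn : pts.length = 0
  · simp [hn]
  · simp only [if_neg hn]
    rw [pv_edges_eq pts]
    rw [pv_loop_input_eq (computeEdgesA pts) ncl
      (PySem.List.pyRange 0 (pts.length : Int), List.replicate pts.length 1)]
    have hrange : ∀ e ∈ PySem.List.slice (computeEdgesA pts) none (some (max 0 ncl)),
        pvInR pts.length e.2.1 ∧ pvInR pts.length e.2.2 :=
      fun e he => pv_edges_inR pts (PySem.List.mem_of_mem_slice _ _ _ he)
    have hJ := pv_loop_equiv (PySem.List.slice (computeEdgesA pts) none (some (max 0 ncl)))
      (PySem.List.pyRange 0 (pts.length : Int), List.replicate pts.length 1)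
      ((PySem.List.pyRange 0 (pts.length : Int)).map (fun i => [i]))
      hrange (pv_JInv_init pts.length)
    obtain ⟨ρ, d, hInv, hCI, hker⟩ := hJ
    have hC1 : 1 ≤ ((PySem.List.slice (computeEdgesA pts) none (some (max 0 ncl))).foldl
        stepB ((PySem.List.pyRange 0 (pts.length : Int)).map (fun i => [i]))).length := by
      have h0R : pvInR pts.length 0 := ⟨le_refl 0, by exact_mod_cast Nat.pos_of_ne_zero hn⟩
      rcases hCI.block_exists h0R with ⟨c, hcM, _⟩
      exact List.length_pos_of_ne_nil (fun hh => by rw [hh] at hcM; simp at hcM)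
    rw [pv_count_loop hInv hC1]
    have hperm := pv_values_perm hCI hker hInv.root_inR hInv.root_idem
    rw [pv_sorted_rev_eq_of_perm _ _ hperm]
    have hne : PySem.List.sorted (((PySem.List.slice (computeEdgesA pts) none
        (some (max 0 ncl))).foldl stepB
        ((PySem.List.pyRange 0 (pts.length : Int)).map (fun i => [i]))).map
        (fun c => PySem.List.len c)) (fun v => v) true ≠ [] := by
      rw [Ne, PySem.List.sorted_eq_nil_iff, List.map_eq_nil_iff]
      intro hh
      rw [hh] at hC1
      simp at hC1
    rw [if_neg hne]
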